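-- pv_equiv track=rewrite | github.com/hieast/PlayGround | MOOC/Rice/Principles of Computing/Word Wrangler.py | gen_all_strings
-- ===== SOURCE A (Python) =====
-- def gen_all_strings(word):
--     """
--     Generate all strings that can be composed from the letters in word
--     in any order.
--
--     Returns a list of all strings that can be formed from the letters
--     in word.
--
--     This function should be recursive.
--     """
--     word_len = len(word)
--     if word_len == 0:
--         return [""]
--     fisrt_char = word[0]
--     rest_word = word[1:]
--     result = gen_all_strings(rest_word)
--     for string in result[:]:
--         for cut in range(len(string)+1):
--             result.append(string[:cut] + fisrt_char + string[cut:])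
--     return result
-- ===== SOURCE B (Python) =====
-- def gen_all_strings(word):
--     result = [""]
--     for ch in reversed(word):
--         result = result + [s[:cut] + ch + s[cut:]
--                            for s in result
--                            for cut in range(len(s) + 1)]
--     return result
-- ===== Notes on version B (the rewrite author's own statement) =====
-- stated objective: simpler
-- what changed: Replaces A's recursion with in-place appends during snapshot iteration by a single iterative loop over the reversed word that rebuilds the list each layer with a comprehension.
import Mathlib
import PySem

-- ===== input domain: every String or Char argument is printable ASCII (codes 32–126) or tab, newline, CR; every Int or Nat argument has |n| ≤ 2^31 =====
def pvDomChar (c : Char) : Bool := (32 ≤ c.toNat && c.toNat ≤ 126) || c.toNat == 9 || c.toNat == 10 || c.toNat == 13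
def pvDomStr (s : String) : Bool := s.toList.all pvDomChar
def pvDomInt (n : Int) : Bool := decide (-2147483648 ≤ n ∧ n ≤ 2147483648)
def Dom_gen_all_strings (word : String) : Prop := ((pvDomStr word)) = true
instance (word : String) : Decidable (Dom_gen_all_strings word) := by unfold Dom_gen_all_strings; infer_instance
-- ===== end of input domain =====

-- B is the same recurrence written iteratively (objective: simpler): one reversed pass with a
-- per-layer comprehension instead of recursion with an in-place append loop.

-- ===== PORT A =====
-- string[:cut] + c + string[cut:] with 0 ≤ cut ≤ len: exact as take/drop on the char list
def pvInsA (s : String) (cut : Nat) (c : Char) : String :=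
  String.mk (s.toList.take cut ++ [c] ++ s.toList.drop cut)

-- A's recursion on word, via its char list (word[0] / word[1:] on a nonempty string)
def genAList : List Char → List String
  | [] => [""]
  | c :: rest =>
      let result := genAList rest
      -- for string in result[:]: for cut in range(len(string)+1): result.append(...)
      result.foldl
        (fun acc s =>
          (List.range (s.toList.length + 1)).foldl
            (fun acc2 cut => acc2 ++ [pvInsA s cut c]) acc)
        result

def gen_all_strings (word : String) : List String := genAList word.toList

-- ===== PORT B =====
-- one layer: the comprehension [s[:cut] + ch + s[cut:] for s in result for cut in range(len(s)+1)]
def pvLayerB (res : List String) (c : Char) : List String :=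
  res ++ res.flatMap (fun s =>
    (List.range (s.toList.length + 1)).map
      (fun cut => String.mk (s.toList.take cut ++ [c] ++ s.toList.drop cut)))

def gen_all_strings_alt (word : String) : List String :=
  word.toList.reverse.foldl pvLayerB [""]

-- ===== PRECONDITION & SPEC =====
def Spec_gen_all_strings (word : String) (out : List String) : Prop := out = gen_all_strings_alt word
instance (word : String) (out : List String) : Decidable (Spec_gen_all_strings word out) := by unfold Spec_gen_all_strings; infer_instance

-- ===== CLAIM (what is proved, stated in full; the proofs are below) =====
def Claim_equal_gen_all_strings : Prop := ∀ (word : String), Dom_gen_all_strings word → Spec_gen_all_strings word (gen_all_strings word)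

-- ===== LEMMAS AND PROOFS =====

-- the inner append-one-at-a-time loop is acc ++ map
theorem foldl_append_singleton {α β : Type} (g : α → β) (l : List α) (acc : List β) :
    l.foldl (fun a x => a ++ [g x]) acc = acc ++ l.map g := by
  induction l generalizing acc with
  | nil => simp
  | cons x xs ih => simp [List.foldl, ih]

-- A's nested loops over the snapshot equal B's layer
theorem genA_step (c : Char) (res : List String) :
    res.foldl
      (fun acc s =>
        (List.range (s.toList.length + 1)).foldl
          (fun acc2 cut => acc2 ++ [pvInsA s cut c]) acc)
      res = pvLayerB res c := by
  unfold pvLayerB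
  have h : ∀ (l acc : List String),
      l.foldl
        (fun acc s =>
          (List.range (s.toList.length + 1)).foldl
            (fun acc2 cut => acc2 ++ [pvInsA s cut c]) acc)
        acc
      = acc ++ l.flatMap (fun s =>
          (List.range (s.toList.length + 1)).map
            (fun cut => String.mk (s.toList.take cut ++ [c] ++ s.toList.drop cut))) := by
    intro l
    induction l with
    | nil => simp
    | cons s xs ih =>
        intro acc
        simp only [List.foldl, List.flatMap_cons, foldl_append_singleton, ih]
        simp [pvInsA, List.flatMap]
  exact h res res

theorem genA_eq_foldr (cs : List Char) :
    genAList cs = cs.foldr (fun c res => pvLayerB res c) [""] := by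
  induction cs with
  | nil => rfl
  | cons c rest ih =>
      calc genAList (c :: rest) = pvLayerB (genAList rest) c := genA_step c (genAList rest)
        _ = pvLayerB (rest.foldr (fun c res => pvLayerB res c) [""]) c := by rw [ih]

-- ===== VERDICT (by name: the statement is the Claim_ definition above) =====
theorem gen_all_strings_spec : Claim_equal_gen_all_strings := by
  intro word _
  unfold Spec_gen_all_strings gen_all_strings gen_all_strings_alt
  rw [genA_eq_foldr, List.foldl_reverse]
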